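-- pv_equiv track=rewrite | github.com/tonymorony/komodo-cctools-python | lib/visualization_lib.py | split_synthetic_on_stacks
-- ===== SOURCE A (Python) =====
-- def split_synthetic_on_stacks(rpc_connection, synthetic, depth):
--     stacks_list = []
--     stack_end = 0
--     for i in range(0, len(synthetic)):
--         if synthetic[i] == '*' or synthetic[i] == '/':
--             temp = synthetic[stack_end:(i + 1)]
--             stacks_list.append(temp)
--             stack_end = i + 1
--     return stacks_list
-- ===== SOURCE B (Python) =====
-- def split_synthetic_on_stacks(rpc_connection, synthetic, depth):
--     result = []
--     buf = ''
--     for c in synthetic: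
--         buf += c
--         if c == '*' or c == '/':
--             result.append(buf)
--             buf = ''
--     return result
-- ===== Notes on version B (the rewrite author's own statement) =====
-- stated objective: alternative
-- what changed: B replaces A's index loop with a slice-by-cursor (stack_end) extraction by a single character-level pass that accumulates characters into a string buffer and flushes the buffer at each '*'/'/' marker; no indices or slicing are used and the unflushed tail buffer is simply dropped, matching A's tail-drop.
import Mathlib
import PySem

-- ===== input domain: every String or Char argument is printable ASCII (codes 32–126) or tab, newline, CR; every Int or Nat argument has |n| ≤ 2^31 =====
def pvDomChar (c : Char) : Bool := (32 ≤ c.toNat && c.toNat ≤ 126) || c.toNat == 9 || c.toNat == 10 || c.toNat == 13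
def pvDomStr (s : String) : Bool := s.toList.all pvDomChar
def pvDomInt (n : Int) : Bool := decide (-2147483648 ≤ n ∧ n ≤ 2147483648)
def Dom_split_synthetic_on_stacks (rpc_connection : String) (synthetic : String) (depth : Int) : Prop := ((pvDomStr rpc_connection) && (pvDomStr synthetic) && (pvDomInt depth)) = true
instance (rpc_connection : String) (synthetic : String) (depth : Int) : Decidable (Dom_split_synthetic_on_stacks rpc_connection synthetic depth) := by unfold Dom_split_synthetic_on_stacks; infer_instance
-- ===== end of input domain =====

-- B replaces A's index loop with cursor-and-slice extraction by a single character-level pass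
-- that grows a string buffer and flushes it at each marker — no indices or slicing (objective: alternative).


-- ===== PORT A =====
-- for i in range(0, len(synthetic)): if synthetic[i] in '*','/' : append synthetic[stack_end:i+1]; stack_end = i+1
def split_synthetic_on_stacks (rpc_connection : String) (synthetic : String) (depth : Int) : List String :=
  let cs := synthetic.toList
  let r := (PySem.List.pyRange 0 (cs.length : Int) 1).foldl
    (fun (st : List String × Int) i =>
      if PySem.List.pyGetD cs i ' ' == '*' || PySem.List.pyGetD cs i ' ' == '/' then
        (st.1 ++ [String.ofList (PySem.List.slice cs (some st.2) (some (i + 1)))], i + 1)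
      else st) ([], 0)
  r.1

-- ===== PORT B =====
-- result, buf = [], ''; for c in synthetic: buf += c; if c in '*','/': result.append(buf); buf = ''
def split_synthetic_on_stacks_alt (rpc_connection : String) (synthetic : String) (depth : Int) : List String :=
  let r := synthetic.toList.foldl
    (fun (st : List String × String) c =>
      let buf := st.2.push c
      if c == '*' || c == '/' then (st.1 ++ [buf], "") else (st.1, buf)) ([], "")
  r.1

-- ===== PRECONDITION & SPEC =====
def Spec_split_synthetic_on_stacks (rpc_connection : String) (synthetic : String) (depth : Int) (out : List String) : Prop := out = split_synthetic_on_stacks_alt rpc_connection synthetic depth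
instance (rpc_connection : String) (synthetic : String) (depth : Int) (out : List String) : Decidable (Spec_split_synthetic_on_stacks rpc_connection synthetic depth out) := by unfold Spec_split_synthetic_on_stacks; infer_instance

-- ===== CLAIM (what is proved, stated in full; the proofs are below) =====
def Claim_equal_split_synthetic_on_stacks : Prop := ∀ (rpc_connection : String) (synthetic : String) (depth : Int), Dom_split_synthetic_on_stacks rpc_connection synthetic depth → Spec_split_synthetic_on_stacks rpc_connection synthetic depth (split_synthetic_on_stacks rpc_connection synthetic depth)

-- ===== LEMMAS AND PROOFS =====

-- reference segmentation: segments of `rest` relative to a pending buffer `buf`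
def pvSegs : List Char → List Char → List (List Char)
  | _, [] => []
  | buf, c :: rest =>
    if c == '*' || c == '/' then (buf ++ [c]) :: pvSegs [] rest else pvSegs (buf ++ [c]) rest

-- B's fold computes acc ++ the reference segmentation of the remaining characters
theorem pvB_fold (rest : List Char) : ∀ (acc : List String) (buf : String),
    (rest.foldl
      (fun (st : List String × String) c =>
        let buf := st.2.push c
        if c == '*' || c == '/' then (st.1 ++ [buf], "") else (st.1, buf)) (acc, buf)).1
      = acc ++ (pvSegs buf.toList rest).map String.ofList := by
  induction rest with
  | nil => intro acc buf; simp [pvSegs]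
  | cons c rest ih =>
    intro acc buf
    have hpush : buf.push c = String.ofList (buf.toList ++ [c]) := by
      apply String.toList_injective; simp
    by_cases h : c == '*' || c == '/'
    · simp only [List.foldl_cons, h, if_pos]
      rw [ih, pvSegs, if_pos h]
      simp [hpush]
    · simp only [List.foldl_cons, h, Bool.false_eq_true, if_neg, not_false_iff]
      rw [ih, pvSegs, if_neg (by simpa using h)]
      simp [hpush]

-- A's fold over the index range [k, |cs|) with stack_end e computes acc ++ the reference
-- segmentation of cs.drop k relative to the buffer cs[e:k]
theorem pvA_fold (cs : List Char) : ∀ (m k e : Nat) (acc : List String),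
    k + m = cs.length → e ≤ k →
    ((List.range' k m).foldl
      (fun (st : List String × Int) (i : Nat) =>
        if PySem.List.pyGetD cs (i : Int) ' ' == '*' || PySem.List.pyGetD cs (i : Int) ' ' == '/' then
          (st.1 ++ [String.ofList (PySem.List.slice cs (some st.2) (some ((i : Int) + 1)))], (i : Int) + 1)
        else st) (acc, (e : Int))).1
      = acc ++ (pvSegs ((cs.drop e).take (k - e)) (cs.drop k)).map String.ofList := by
  intro m
  induction m with
  | zero =>
    intro k e acc hk _
    have h0 : List.drop k cs = [] := List.drop_eq_nil_of_le (by omega)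
    simp [List.range', h0, pvSegs]
  | succ m ih =>
    intro k e acc hk he
    have hklt : k < cs.length := by omega
    have hdrop : cs.drop k = cs[k] :: cs.drop (k + 1) := (List.getElem_cons_drop hklt).symm
    have hgetD : cs.getD k ' ' = cs[k] := List.getD_eq_getElem cs ' ' hklt
    have htake : ∀ e' : Nat, e' ≤ k →
        (cs.drop e').take (k + 1 - e') = (cs.drop e').take (k - e') ++ [cs[k]] := by
      intro e' he'
      have : k + 1 - e' = (k - e') + 1 := by omega
      rw [this, List.take_succ]
      have : (cs.drop e')[k - e']? = some cs[k] := by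
        rw [List.getElem?_drop]
        have : e' + (k - e') = k := by omega
        rw [this, List.getElem?_eq_getElem hklt]
      simp [this]
    rw [List.range'_succ, List.foldl_cons]
    by_cases h : cs.getD k ' ' == '*' || cs.getD k ' ' == '/'
    · rw [if_pos (by simpa using h)]
      have hslice : PySem.List.slice cs (some (e : Int)) (some ((k : Int) + 1))
          = (cs.drop e).take (k + 1 - e) := by
        have : ((k : Int) + 1) = ((k + 1 : Nat) : Int) := by push_cast; ring
        rw [this, PySem.List.slice_natCast]
      have : ((k : Int) + 1) = (((k + 1 : Nat)) : Int) := by push_cast; ring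
      rw [hslice, this, ih (k + 1) (k + 1) _ (by omega) (le_refl _)]
      rw [hdrop]
      simp only [pvSegs, hgetD ▸ h, if_pos]
      rw [htake e he]
      simp
    · rw [if_neg (by simpa using h)]
      have hc : (cs[k] == '*' || cs[k] == '/') = false := by
        rw [← hgetD]; simpa using h
      rw [ih (k + 1) e _ (by omega) (by omega), hdrop, htake e he]
      simp [pvSegs, hc]

theorem split_synthetic_on_stacks_eq (rpc_connection synthetic : String) (depth : Int) :
    split_synthetic_on_stacks rpc_connection synthetic depth
      = split_synthetic_on_stacks_alt rpc_connection synthetic depth := by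
  dsimp only [split_synthetic_on_stacks, split_synthetic_on_stacks_alt]
  rw [show ((synthetic.toList.length : Int)) = ((synthetic.toList.length : Nat) : Int) from rfl,
      PySem.List.pyRange_zero_nat, List.foldl_map,
      show (List.range synthetic.toList.length) = List.range' 0 synthetic.toList.length by
        simp [List.range_eq_range']]
  rw [show ((0 : Int)) = ((0 : Nat) : Int) from rfl,
      pvA_fold synthetic.toList synthetic.toList.length 0 0 [] (by omega) (by omega)]
  rw [pvB_fold]
  simp

-- ===== VERDICT (by name: the statement is the Claim_ definition above) =====
theorem split_synthetic_on_stacks_spec : Claim_equal_split_synthetic_on_stacks := by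
  intro rpc synthetic depth _
  unfold Spec_split_synthetic_on_stacks
  exact split_synthetic_on_stacks_eq rpc synthetic depth
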